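-- pv_equiv track=rewrite | github.com/tovyt/wherewasitshot | scripts/seed/build_seed_list.py | month_sequence
-- ===== SOURCE A (Python) =====
-- from typing import Dict, List, Optional, Tuple
--
-- def month_sequence(end_year: int, end_month: int, count: int) -> List[Tuple[int, int]]:
--     months = []
--     year, month = end_year, end_month
--     for _ in range(count):
--         months.append((year, month))
--         month -= 1
--         if month == 0:
--             month = 12
--             year -= 1
--     months.reverse()
--     return months
-- ===== SOURCE B (Python) =====
-- def month_sequence(end_year, end_month, count):
--     last = end_year * 12 + end_month - 1
--     return [(i // 12, i % 12 + 1) for i in range(last - count + 1, last + 1)]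
-- ===== Notes on version B (the rewrite author's own statement) =====
-- stated objective: simpler
-- what changed: Replaced the stateful decrement loop with wrap-at-zero branch and final reverse by a single comprehension over a linear month-index range, each pair recovered by divmod; Pre_ excludes calls with positive count and end_month outside 1..12, a non-calendar corner where A's decrement loop emits unnormalized pseudo-month pairs while B's divmod normalizes them -- neither value is specified.
-- outside the precondition, e.g. on month_sequence(2020, 0, 2): A returns [(2020, -1), (2020, 0)], B returns [(2019, 11), (2019, 12)]; on month_sequence(2020, 13, 2): A returns [(2020, 12), (2020, 13)], B returns [(2020, 12), (2021, 1)]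
import Mathlib
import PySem

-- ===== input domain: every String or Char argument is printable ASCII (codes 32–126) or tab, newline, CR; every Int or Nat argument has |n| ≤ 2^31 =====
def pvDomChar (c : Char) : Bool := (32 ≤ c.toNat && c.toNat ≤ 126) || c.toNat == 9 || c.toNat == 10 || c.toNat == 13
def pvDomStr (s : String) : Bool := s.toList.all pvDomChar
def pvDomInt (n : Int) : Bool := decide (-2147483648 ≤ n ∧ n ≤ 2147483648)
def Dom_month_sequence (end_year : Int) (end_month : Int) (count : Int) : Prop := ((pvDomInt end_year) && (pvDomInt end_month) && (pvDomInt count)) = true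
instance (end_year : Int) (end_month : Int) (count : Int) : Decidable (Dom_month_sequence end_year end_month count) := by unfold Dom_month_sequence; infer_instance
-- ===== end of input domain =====

-- B replaces A's stateful decrement/wrap loop + final reverse by one comprehension over a
-- linear month-index range, each pair recovered by divmod (simpler; same O(count) cost).

-- ===== PORT A =====
-- the 'for _ in range(count)' loop with state (months, year, month)
def monthLoopA : Nat → Int → Int → List (Int × Int) → List (Int × Int)
  | 0, _, _, months => months
  | n + 1, year, month, months =>
      let months' := months ++ [(year, month)]
      let month' := month - 1
      if month' = 0 then monthLoopA n (year - 1) 12 months'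
      else monthLoopA n year month' months'

def month_sequence (end_year : Int) (end_month : Int) (count : Int) : List (Int × Int) :=
  (monthLoopA count.toNat end_year end_month []).reverse

-- ===== PORT B =====
-- Source B's comprehension body: the (year, month) pair of linear month index i
def pvPairOf (i : Int) : Int × Int :=
  (PySem.Int.floordiv i 12, PySem.Int.mod i 12 + 1)

def month_sequence_alt (end_year : Int) (end_month : Int) (count : Int) : List (Int × Int) :=
  let last := end_year * 12 + end_month - 1
  (PySem.List.pyRange (last - count + 1) (last + 1) 1).map pvPairOf

-- ===== PRECONDITION & SPEC =====
-- Pre_ excludes calls with a positive count and end_month outside 1..12: a non-calendar corner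
-- on which A's decrement loop emits unnormalized pseudo-month pairs (e.g. (2020, 0)) while B's
-- divmod normalizes them; neither value is specified. It admits every count for valid months.
def Pre_month_sequence (end_year : Int) (end_month : Int) (count : Int) : Prop :=
  (1 ≤ end_month ∧ end_month ≤ 12) ∨ count ≤ 0
instance (end_year : Int) (end_month : Int) (count : Int) : Decidable (Pre_month_sequence end_year end_month count) := by unfold Pre_month_sequence; infer_instance

def pvWitness_month_sequence : Int × Int × Int := (2024, 3, 14)

def Spec_month_sequence (end_year : Int) (end_month : Int) (count : Int) (out : List (Int × Int)) : Prop := out = month_sequence_alt end_year end_month count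
instance (end_year : Int) (end_month : Int) (count : Int) (out : List (Int × Int)) : Decidable (Spec_month_sequence end_year end_month count out) := by unfold Spec_month_sequence; infer_instance

-- ===== CLAIM (what is proved, stated in full; the proofs are below) =====
def Claim_equal_month_sequence : Prop := ∀ (end_year : Int) (end_month : Int) (count : Int), Dom_month_sequence end_year end_month count → Pre_month_sequence end_year end_month count → Spec_month_sequence end_year end_month count (month_sequence end_year end_month count)

-- ===== LEMMAS AND PROOFS =====

-- for a calendar month m, the pair of the linear index y*12 + m - 1 is (y, m)
lemma pvPairOf_idx (y m : Int) (h1 : 1 ≤ m) (h2 : m ≤ 12) :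
    pvPairOf (y * 12 + m - 1) = (y, m) := by
  unfold pvPairOf
  rw [PySem.Int.floordiv_eq_ediv_of_pos (by norm_num),
      PySem.Int.mod_eq_emod_of_pos (by norm_num)]
  refine Prod.ext ?_ ?_ <;> simp only <;> omega

-- A's loop, for a valid month state, produces the pairs of descending linear indices
lemma monthLoopA_eq (n : Nat) : ∀ (y m : Int), 1 ≤ m → m ≤ 12 → ∀ (acc : List (Int × Int)),
    monthLoopA n y m acc
      = acc ++ (List.range n).map (fun j : Nat => pvPairOf (y * 12 + m - 1 - (j : Int))) := by
  induction n with
  | zero => intro y m _ _ acc; simp [monthLoopA]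
  | succ n ih =>
      intro y m h1 h2 acc
      rw [List.range_succ_eq_map (n := n)]
      simp only [monthLoopA, List.map_cons, List.map_map]
      by_cases hm : m - 1 = 0
      · rw [if_pos hm, ih (y - 1) 12 (by norm_num) (by norm_num)]
        have hcg : (List.range n).map
              ((fun j : Nat => pvPairOf (y * 12 + m - 1 - (j : Int))) ∘ Nat.succ)
            = (List.range n).map (fun j : Nat => pvPairOf ((y - 1) * 12 + 12 - 1 - (j : Int))) := by
          apply List.map_congr_left
          intro j _
          simp only [Function.comp, Nat.succ_eq_add_one]
          congr 1
          push_cast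
          omega
        rw [hcg]
        simp [pvPairOf_idx y m h1 h2]
      · rw [if_neg hm, ih y (m - 1) (by omega) (by omega)]
        have hcg : (List.range n).map
              ((fun j : Nat => pvPairOf (y * 12 + m - 1 - (j : Int))) ∘ Nat.succ)
            = (List.range n).map (fun j : Nat => pvPairOf (y * 12 + (m - 1) - 1 - (j : Int))) := by
          apply List.map_congr_left
          intro j _
          simp only [Function.comp, Nat.succ_eq_add_one]
          congr 1
          push_cast
          omega
        rw [hcg]
        simp [pvPairOf_idx y m h1 h2]

-- ===== VERDICT (by name: the statement is the Claim_ definition above) =====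
theorem month_sequence_spec : Claim_equal_month_sequence := by
  intro y m c _ hpre
  show month_sequence y m c = month_sequence_alt y m c
  unfold month_sequence month_sequence_alt
  simp only [PySem.List.pyRange_one]
  by_cases hc : c ≤ 0
  · have h0 : c.toNat = 0 := by omega
    simp [h0, monthLoopA]
    omega
  · obtain ⟨hm1, hm2⟩ : 1 ≤ m ∧ m ≤ 12 := by
      rcases hpre with h | h
      · exact h
      · omega
    rw [monthLoopA_eq c.toNat y m hm1 hm2 []]
    have hlen : (y * 12 + m - 1 + 1 - (y * 12 + m - 1 - c + 1)).toNat = c.toNat := by omega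
    rw [hlen]
    simp only [List.nil_append, List.map_map]
    apply List.ext_getElem
    · simp
    · intro k h1 h2
      have hk : k < c.toNat := by simpa using h2
      rw [List.getElem_reverse]
      simp only [List.getElem_map, List.getElem_range, List.length_map, List.length_range,
        Function.comp]
      congr 1
      omega
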